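-- pv_equiv track=rewrite | github.com/kuznetsovvj/education | algorithms/codeforces/1385c.py | check
-- ===== SOURCE A (Python) =====
-- def check(seq):
--     up = True
--     for i in range(len(seq)-1, 0, -1):
--         if up:
--             if seq[i] <= seq[i-1]:
--                 continue
--             else:
--                 up = False
--         else:
--             if seq[i] >= seq[i-1]:
--                 continue
--             else:
--                 return i
--     return 0
-- ===== SOURCE B (Python) =====
-- def check(seq):
--     ans = 0
--     last_fall = 0
--     for i in range(1, len(seq)):
--         if seq[i] < seq[i - 1]:
--             last_fall = i
--         elif seq[i] > seq[i - 1]: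
--             ans = last_fall
--     return ans
-- ===== Notes on version B (the rewrite author's own statement) =====
-- stated objective: simpler
-- what changed: Replaced A's backward two-phase flagged scan with one forward left-to-right pass keeping an accumulator: remember the most recent strict fall index and, at every strict rise, record it as the answer (the result is the last fall before the last rise).
import Mathlib
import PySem

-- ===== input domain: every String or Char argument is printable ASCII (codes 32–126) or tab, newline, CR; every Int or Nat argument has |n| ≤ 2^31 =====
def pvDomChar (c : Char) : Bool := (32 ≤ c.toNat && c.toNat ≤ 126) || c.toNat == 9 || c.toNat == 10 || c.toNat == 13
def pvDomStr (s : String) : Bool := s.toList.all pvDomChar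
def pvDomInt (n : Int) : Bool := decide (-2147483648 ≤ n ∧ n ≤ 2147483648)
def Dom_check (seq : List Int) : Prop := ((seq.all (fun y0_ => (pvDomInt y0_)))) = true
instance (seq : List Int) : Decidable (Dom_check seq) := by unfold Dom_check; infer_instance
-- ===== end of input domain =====

-- B replaces A's backward flagged two-phase scan with one forward pass and an accumulator
-- (last fall index; latest rise records it as the answer); same O(n) cost, objective: simpler.

-- ===== PORT A =====
-- all indices visited (1 .. len-1, and i-1) are in range, so pyGetD with default 0 is exact
def checkLoop (seq : List Int) : List Int → Bool → Int
  | [], _ => 0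
  | i :: rest, up =>
    if up then
      if PySem.List.pyGetD seq i 0 ≤ PySem.List.pyGetD seq (i - 1) 0 then
        checkLoop seq rest true
      else
        checkLoop seq rest false
    else
      if PySem.List.pyGetD seq i 0 ≥ PySem.List.pyGetD seq (i - 1) 0 then
        checkLoop seq rest false
      else
        i

def check (seq : List Int) : Int :=
  checkLoop seq (PySem.List.pyRange ((seq.length : Int) - 1) 0 (-1)) true

-- ===== PORT B =====
-- state = (last_fall, ans), updated left to right over range(1, len(seq))
def checkStep (seq : List Int) (s : Int × Int) (i : Int) : Int × Int :=
  if PySem.List.pyGetD seq i 0 < PySem.List.pyGetD seq (i - 1) 0 then (i, s.2)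
  else if PySem.List.pyGetD seq i 0 > PySem.List.pyGetD seq (i - 1) 0 then (s.1, s.1)
  else s

def check_alt (seq : List Int) : Int :=
  ((PySem.List.pyRange 1 (seq.length : Int) 1).foldl (checkStep seq) (0, 0)).2

-- ===== PRECONDITION & SPEC =====
def Spec_check (seq : List Int) (out : Int) : Prop := out = check_alt seq
instance (seq : List Int) (out : Int) : Decidable (Spec_check seq out) := by unfold Spec_check; infer_instance

-- ===== CLAIM =====
def Claim_equal_check : Prop := ∀ (seq : List Int), Dom_check seq → Spec_check seq (check seq)

-- ===== LEMMAS AND PROOFS =====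

-- A's down-phase on the reverse of L returns the last fall index recorded in B's accumulator
theorem checkLoop_false_eq (seq : List Int) (M : List Int) :
    checkLoop seq M false = ((M.reverse.foldl (checkStep seq) (0, 0)).1) := by
  induction M with
  | nil => rfl
  | cons i rest ih =>
    simp only [checkLoop, List.reverse_cons, List.foldl_append, List.foldl_cons, List.foldl_nil]
    by_cases h1 : PySem.List.pyGetD seq i 0 < PySem.List.pyGetD seq (i - 1) 0
    · have h2 : ¬ PySem.List.pyGetD seq i 0 ≥ PySem.List.pyGetD seq (i - 1) 0 := not_le.mpr h1
      simp [h2, checkStep, h1]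
    · have h2 : PySem.List.pyGetD seq i 0 ≥ PySem.List.pyGetD seq (i - 1) 0 := not_lt.mp h1
      simp only [h2, if_pos, ih]
      unfold checkStep
      by_cases h3 : PySem.List.pyGetD seq i 0 > PySem.List.pyGetD seq (i - 1) 0 <;> simp [h1, h3]

-- A's full loop on the reverse of L equals B's fold over L (answer component)
theorem checkLoop_true_eq (seq : List Int) (M : List Int) :
    checkLoop seq M true = ((M.reverse.foldl (checkStep seq) (0, 0)).2) := by
  induction M with
  | nil => rfl
  | cons i rest ih =>
    simp only [checkLoop, List.reverse_cons, List.foldl_append, List.foldl_cons, List.foldl_nil]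
    by_cases h1 : PySem.List.pyGetD seq i 0 ≤ PySem.List.pyGetD seq (i - 1) 0
    · simp only [h1, if_pos, ih]
      unfold checkStep
      by_cases h2 : PySem.List.pyGetD seq i 0 < PySem.List.pyGetD seq (i - 1) 0
      · simp [h2]
      · have h3 : ¬ PySem.List.pyGetD seq i 0 > PySem.List.pyGetD seq (i - 1) 0 := not_lt.mpr h1
        simp [h2, h3]
    · have h2 : PySem.List.pyGetD seq i 0 > PySem.List.pyGetD seq (i - 1) 0 := lt_of_not_ge h1
      have h3 : ¬ PySem.List.pyGetD seq i 0 < PySem.List.pyGetD seq (i - 1) 0 :=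
        not_lt.mpr (le_of_lt h2)
      simp only [h1, if_neg, not_false_iff, checkLoop_false_eq seq rest]
      simp [checkStep, h3, h2]

-- ===== VERDICT =====
theorem check_spec : Claim_equal_check := by
  intro seq _
  show check seq = check_alt seq
  unfold check check_alt
  rw [checkLoop_true_eq]
  have h : PySem.List.pyRange ((seq.length : Int) - 1) 0 (-1)
      = (PySem.List.pyRange 1 (seq.length : Int) 1).reverse := by
    rw [PySem.List.pyRange_neg_one_eq_reverse]
    norm_num
  rw [h, List.reverse_reverse]
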